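-- pv_equiv track=rewrite | github.com/piotrhelm/NESTFUL | data_v2/executable_functions/py_code_file_214.py | word_count_and_length
-- ===== SOURCE A (Python) =====
-- from typing import Dict
--
-- def word_count_and_length(text: str) -> Dict[str, Dict[str, int]]:
--
--     """Calculates the word counts and lengths in a given string.
--
--
--
--     Args:
--
--         text: The input string.
--
--
--
--     Returns:
--
--         A dictionary of word counts and lengths.
--
--     """
--
--     words = text.split()
--
--     word_counts = {}
--
--
--
--     for word in words:
--
--         word = word.lower()
--
--         length = len(word)
--
--         if word in word_counts:
--
--             word_counts[word]['count'] += 1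
--
--         else:
--
--             word_counts[word] = {'count': 1, 'length': length}
--
--
--
--     return word_counts
-- ===== SOURCE B (Python) =====
-- def word_count_and_length(text):
--     """Dedup-then-rescan: collect distinct lowercased words in first-seen order,
--     then count each by rescanning the full word list."""
--     words = [w.lower() for w in text.split()]
--     seen = []
--     for w in words:
--         if w not in seen:
--             seen.append(w)
--     return {w: {'count': words.count(w), 'length': len(w)} for w in seen}
-- ===== Notes on version B (the rewrite author's own statement) =====
-- stated objective: alternative
-- what changed: Replaces A's single-pass dict with incremental count updates by a dedup-then-rescan algorithm: first collect the distinct lowercased words in first-seen order, then compute each word's count by rescanning the whole word list with list.count; no counts are maintained incrementally and no dict is used during traversal.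
import Mathlib
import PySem

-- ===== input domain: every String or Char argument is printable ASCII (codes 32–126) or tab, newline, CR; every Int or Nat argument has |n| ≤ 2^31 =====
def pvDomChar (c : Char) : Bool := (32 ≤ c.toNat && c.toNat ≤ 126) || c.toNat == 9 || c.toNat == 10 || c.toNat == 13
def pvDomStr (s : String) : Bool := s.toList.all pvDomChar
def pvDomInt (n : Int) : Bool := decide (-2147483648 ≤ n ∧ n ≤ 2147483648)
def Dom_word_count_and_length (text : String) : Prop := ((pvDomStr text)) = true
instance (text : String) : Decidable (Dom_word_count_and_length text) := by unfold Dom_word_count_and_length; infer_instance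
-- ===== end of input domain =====

-- B replaces A's single-pass incremental dict tally by a dedup-then-rescan algorithm:
-- distinct lowercased words in first-seen order, each counted by rescanning the word list.

-- ===== PORT A =====
-- the loop body of A: lowercase the word, then bump the count or insert a fresh record
def wclStep (d : PySem.Dict String (PySem.Dict String Int)) (word : String) :
    PySem.Dict String (PySem.Dict String Int) :=
  let w := PySem.Str.lower word
  let length := PySem.Str.len w
  match d.get? w with
  | some inner => d.insert w (inner.modify "count" 0 (· + 1))
  | none => d.insert w (PySem.Dict.ofList [("count", 1), ("length", length)])

def word_count_and_length (text : String) : List (String × List (String × Int)) :=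
  let words := PySem.Str.split₀ text
  let word_counts := words.foldl wclStep PySem.Dict.empty
  word_counts.items.map (fun p => (p.1, p.2.items))

-- ===== PORT B =====
def word_count_and_length_alt (text : String) : List (String × List (String × Int)) :=
  let words := (PySem.Str.split₀ text).map PySem.Str.lower
  -- the dedup loop ('if w not in seen: seen.append(w)') is exactly PySem.Set.ofList
  let seen := PySem.Set.ofList words
  seen.map (fun w => (w, [("count", (words.count w : Int)), ("length", PySem.Str.len w)]))

-- ===== PRECONDITION & SPEC =====
def Spec_word_count_and_length (text : String) (out : List (String × List (String × Int))) : Prop := out = word_count_and_length_alt text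
instance (text : String) (out : List (String × List (String × Int))) : Decidable (Spec_word_count_and_length text out) := by unfold Spec_word_count_and_length; infer_instance

-- ===== CLAIM (what is proved, stated in full; the proofs are below) =====
def Claim_equal_word_count_and_length : Prop := ∀ (text : String), Dom_word_count_and_length text → Spec_word_count_and_length text (word_count_and_length text)

-- ===== LEMMAS AND PROOFS =====
-- proof helpers: A's fold equals the mapped image of a plain counter
def wclInner (c : Int) (w : String) : PySem.Dict String Int :=
  PySem.Dict.mk [("count", c), ("length", PySem.Str.len w)]

def wclTr (p : String × Int) : String × PySem.Dict String Int := (p.1, wclInner p.2 p.1)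

def wclMapVal (d : PySem.Dict String Int) : PySem.Dict String (PySem.Dict String Int) :=
  PySem.Dict.mk (d.items.map wclTr)

theorem wcl_keys_mapVal (d : PySem.Dict String Int) : (wclMapVal d).keys = d.keys := by
  simp [wclMapVal, PySem.Dict.keys, List.map_map, wclTr]

theorem wcl_get?_mapVal_list (L : List (String × Int)) (w : String) :
    (PySem.Dict.mk (L.map wclTr)).get? w
      = ((PySem.Dict.mk L).get? w).map (fun c => wclInner c w) := by
  induction L with
  | nil => rfl
  | cons p rest ih =>
    simp only [List.map_cons]
    rw [show (wclTr p) = (p.1, wclInner p.2 p.1) from rfl]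
    rw [PySem.Dict.get?_mk_cons, PySem.Dict.get?_mk_cons]
    by_cases h : p.1 == w
    · have : p.1 = w := by simpa using h
      subst this
      simp
    · simp [h, ih]

theorem wcl_get?_mapVal (d : PySem.Dict String Int) (w : String) :
    (wclMapVal d).get? w = (d.get? w).map (fun c => wclInner c w) :=
  wcl_get?_mapVal_list d.items w

theorem wcl_contains_mapVal (d : PySem.Dict String Int) (w : String) :
    (wclMapVal d).contains w = d.contains w := by
  rw [PySem.Dict.contains_eq_decide_mem_keys, PySem.Dict.contains_eq_decide_mem_keys,
    wcl_keys_mapVal]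

theorem wcl_inner_modify (c : Int) (w : String) :
    (wclInner c w).modify "count" 0 (· + 1) = wclInner (c + 1) w := by
  simp [wclInner, PySem.Dict.modify, PySem.Dict.insert, PySem.Dict.getD, PySem.Dict.get?,
    PySem.Dict.contains]

theorem wcl_ofList_inner (w : String) :
    (PySem.Dict.ofList [("count", (1 : Int)), ("length", PySem.Str.len w)]) = wclInner 1 w := by
  simp [wclInner, PySem.Dict.ofList, PySem.Dict.update, PySem.Dict.insert, PySem.Dict.contains,
    PySem.Dict.empty]

theorem wcl_listlem (L : List (String × Int)) (w : String) (c : Int)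
    (h : ∀ p ∈ L, p.1 = w → p.2 = c) :
    (L.map (fun p => if p.1 == w then (w, c + 1) else p)).map wclTr
      = (L.map wclTr).map (fun q => if q.1 == w then (w, wclInner (c + 1) w) else q) := by
  induction L with
  | nil => rfl
  | cons p rest ih =>
    have ih' := ih (fun q hq => h q (List.mem_cons_of_mem _ hq))
    by_cases hp : p.1 == w
    · have h1 : p.1 = w := by simpa using hp
      have h2 : p.2 = c := h p (List.mem_cons_self ..) h1
      simp only [List.map_cons, hp, if_pos, ih']
      congr 1
      simp [wclTr, h1, h2]
    · simp only [List.map_cons, ih']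
      congr 1
      have : (wclTr p).1 = p.1 := rfl
      simp [hp, this]

theorem wcl_step_mapVal (d : PySem.Dict String Int) (word : String) (hnd : d.keys.Nodup) :
    wclStep (wclMapVal d) word = wclMapVal (d.modify (PySem.Str.lower word) 0 (· + 1)) := by
  set w := PySem.Str.lower word with hw
  have hmod : d.modify w 0 (· + 1) = d.insert w (d.getD w 0 + 1) := rfl
  cases hg : d.get? w with
  | none =>
    have hc : d.contains w = false := by
      rw [← PySem.Dict.get?_eq_none_iff_contains]; exact hg
    have hc' : (wclMapVal d).contains w = false := by rw [wcl_contains_mapVal]; exact hc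
    have hstep : wclStep (wclMapVal d) word
        = (wclMapVal d).insert w (PySem.Dict.ofList [("count", 1), ("length", PySem.Str.len w)]) := by
      simp only [wclStep, ← hw, wcl_get?_mapVal, hg, Option.map_none]
    have hgd : d.getD w 0 = 0 := by simp [PySem.Dict.getD_eq_get?_getD, hg]
    rw [hstep, wcl_ofList_inner, hmod, hgd]
    apply PySem.Dict.ext
    rw [PySem.Dict.items_insert_of_not_contains _ _ hc']
    show (wclMapVal d).items ++ [(w, wclInner 1 w)] = (wclMapVal (d.insert w (0 + 1))).items
    rw [show ((0 : Int) + 1) = 1 by norm_num]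
    show (wclMapVal d).items ++ [(w, wclInner 1 w)] = (d.insert w 1).items.map wclTr
    rw [PySem.Dict.items_insert_of_not_contains _ _ hc]
    simp [wclMapVal, wclTr]
  | some c =>
    have hc : d.contains w = true := by
      cases h : d.contains w
      · rw [← PySem.Dict.get?_eq_none_iff_contains] at h; rw [h] at hg; cases hg
      · rfl
    have hc' : (wclMapVal d).contains w = true := by rw [wcl_contains_mapVal]; exact hc
    have hstep : wclStep (wclMapVal d) word
        = (wclMapVal d).insert w ((wclInner c w).modify "count" 0 (· + 1)) := by
      simp only [wclStep, ← hw, wcl_get?_mapVal, hg, Option.map_some]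
    have hgd : d.getD w 0 = c := by simp [PySem.Dict.getD_eq_get?_getD, hg]
    rw [hstep, wcl_inner_modify, hmod, hgd]
    apply PySem.Dict.ext
    rw [PySem.Dict.items_insert_of_contains _ _ hc']
    show (wclMapVal d).items.map (fun p => if p.1 == w then (w, wclInner (c + 1) w) else p)
        = (wclMapVal (d.insert w (c + 1))).items
    show (wclMapVal d).items.map (fun p => if p.1 == w then (w, wclInner (c + 1) w) else p)
        = (d.insert w (c + 1)).items.map wclTr
    rw [PySem.Dict.items_insert_of_contains _ _ hc]
    rw [wcl_listlem d.items w c]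
    · rfl
    · rintro ⟨a, b⟩ hp h1
      have h2 := PySem.Dict.get?_of_mem_items _ hp hnd
      simp only at h1
      rw [h1, hg] at h2
      exact (Option.some.injEq ..).mp h2.symm

theorem wcl_nodup_modify (d : PySem.Dict String Int) (k : String) (hnd : d.keys.Nodup) :
    (d.modify k 0 (· + 1)).keys.Nodup := by
  show (d.insert k (d.getD k 0 + 1)).keys.Nodup
  exact PySem.Dict.nodup_keys_insert _ _ _ hnd

theorem wcl_fold (ws : List String) : ∀ (d : PySem.Dict String Int), d.keys.Nodup →
    ws.foldl wclStep (wclMapVal d)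
      = wclMapVal (ws.foldl (fun d x => d.modify (PySem.Str.lower x) 0 (· + 1)) d) := by
  induction ws with
  | nil => intro d _; rfl
  | cons x rest ih =>
    intro d hnd
    simp only [List.foldl_cons]
    rw [wcl_step_mapVal d x hnd]
    exact ih _ (wcl_nodup_modify d _ hnd)

theorem wcl_final (text : String) :
    word_count_and_length text = word_count_and_length_alt text := by
  show ((PySem.Str.split₀ text).foldl wclStep PySem.Dict.empty).items.map (fun p => (p.1, p.2.items))
      = (PySem.Set.ofList ((PySem.Str.split₀ text).map PySem.Str.lower)).map
          (fun w => (w, [("count", (((PySem.Str.split₀ text).map PySem.Str.lower).count w : Int)),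
                         ("length", PySem.Str.len w)]))
  have h0 : (PySem.Dict.empty : PySem.Dict String (PySem.Dict String Int))
      = wclMapVal PySem.Dict.empty := rfl
  have hnd : (PySem.Dict.empty : PySem.Dict String Int).keys.Nodup := List.nodup_nil
  rw [h0, wcl_fold _ _ hnd]
  have hc : (PySem.Str.split₀ text).foldl (fun d x => d.modify (PySem.Str.lower x) 0 (· + 1))
        PySem.Dict.empty
      = PySem.Dict.counter ((PySem.Str.split₀ text).map PySem.Str.lower) := by
    rw [PySem.Dict.counter_eq_foldl, List.foldl_map]
  rw [hc]
  show ((PySem.Dict.counter _).items.map wclTr).map (fun p => (p.1, p.2.items)) = _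
  rw [PySem.Dict.items_counter, List.map_map, List.map_map]
  rfl

-- ===== VERDICT (by name: the statement is the Claim_ definition above) =====
theorem word_count_and_length_spec : Claim_equal_word_count_and_length := by
  intro text _
  exact wcl_final text
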